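-- pv_equiv track=rewrite | github.com/Veks7/MAI_python | 6 kata/Remember.py | remember
-- ===== SOURCE A (Python) =====
-- def remember(str_):
--     d = {}
--     res = []
--     for el in str_:
--         if el not in d:
--             d.update( { el : 0 } )
--         elif el not in res:
--             res.append(el)
--
--     return res
-- ===== SOURCE B (Python) =====
-- def remember(str_):
--     pos = {}
--     for i, ch in enumerate(str_):
--         pos.setdefault(ch, []).append(i)
--     pairs = sorted([(p[1], ch) for ch, p in pos.items() if len(p) >= 2],
--                    key=lambda t: t[0])
--     return [ch for _, ch in pairs]
-- ===== Notes on version B (the rewrite author's own statement) =====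
-- stated objective: alternative
-- what changed: A streams over the string keeping a seen-dict and appending a character the moment it is sighted a second time; B instead builds a position table (char -> list of indices) in one pass, keeps the chars with at least two positions, and emits them sorted by their second-occurrence index.
import Mathlib
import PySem

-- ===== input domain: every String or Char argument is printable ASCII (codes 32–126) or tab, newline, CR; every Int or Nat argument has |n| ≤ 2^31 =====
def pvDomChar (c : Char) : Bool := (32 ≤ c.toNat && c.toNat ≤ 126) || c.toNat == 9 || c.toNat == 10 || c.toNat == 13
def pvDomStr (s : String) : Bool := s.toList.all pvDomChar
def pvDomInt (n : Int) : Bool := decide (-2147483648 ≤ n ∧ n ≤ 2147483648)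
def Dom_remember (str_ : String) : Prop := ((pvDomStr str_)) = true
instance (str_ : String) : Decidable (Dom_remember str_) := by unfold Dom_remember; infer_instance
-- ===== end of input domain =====

-- B replaces A's streaming seen-dict/second-sighting-append pass by a position-table
-- (char → index list) followed by emission sorted by the second-occurrence index (alternative decomposition).

-- ===== PORT A =====
def remember (str_ : String) : List String :=
  (str_.toList.foldl
    (fun (st : PySem.Dict String Int × List String) c =>
      let el := String.mk [c]
      if !(st.1.contains el) then (st.1.insert el 0, st.2)
      else if !(st.2.contains el) then (st.1, st.2 ++ [el])
      else st)
    (PySem.Dict.empty, [])).2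

-- ===== PORT B =====
def remember_alt (str_ : String) : List String :=
  let pos : PySem.Dict String (List Int) :=
    (PySem.List.enumerate str_.toList).foldl
      (fun d p => d.modify (String.mk [p.2]) [] (· ++ [p.1]))
      PySem.Dict.empty
  let pairs : List (Int × String) :=
    (pos.items.filter (fun q => decide (2 ≤ q.2.length))).map
      (fun q => (PySem.List.pyGetD q.2 1 0, q.1))
  (PySem.List.sorted pairs (fun t => t.1) false).map (fun t => t.2)

-- ===== PRECONDITION & SPEC =====
def Spec_remember (str_ : String) (out : List String) : Prop := out = remember_alt str_
instance (str_ : String) (out : List String) : Decidable (Spec_remember str_ out) := by unfold Spec_remember; infer_instance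

-- ===== CLAIM (what is proved, stated in full; the proofs are below) =====
def Claim_equal_remember : Prop := ∀ (str_ : String), Dom_remember str_ → Spec_remember str_ (remember str_)

-- ===== LEMMAS AND PROOFS =====

/-- one-char string from a char (what iterating a Python string yields) -/
def toS (c : Char) : String := String.mk [c]

/-- A's loop body, over the already-converted one-char strings -/
def stepA (st : PySem.Dict String Int × List String) (el : String) :
    PySem.Dict String Int × List String :=
  if !(st.1.contains el) then (st.1.insert el 0, st.2)
  else if !(st.2.contains el) then (st.1, st.2 ++ [el])
  else st

/-- B's dict-building loop body, over converted enumerate pairs -/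
def stepB (d : PySem.Dict String (List Int)) (p : Int × String) :
    PySem.Dict String (List Int) :=
  d.modify p.2 [] (· ++ [p.1])

/-- second-occurrence entries of ss: (index, element) at the exact second sighting -/
def SO (ss : List String) : List (Int × String) :=
  (PySem.List.enumerate ss).filter (fun p => (ss.take p.1.toNat).count p.2 == 1)

/-- list of indices at which s occurs in ss -/
def idxs (ss : List String) (s : String) : List Int :=
  ((PySem.List.enumerate ss).filter (fun p => p.2 == s)).map (·.1)

theorem enum_map {α β : Type} (f : α → β) (l : List α) (s : Int) :
    PySem.List.enumerate (l.map f) s = (PySem.List.enumerate l s).map (fun p => (p.1, f p.2)) := by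
  induction l generalizing s with
  | nil => simp [PySem.List.enumerate_nil]
  | cons x t ih => simp [PySem.List.enumerate_cons, ih]

theorem enum_append_singleton {α : Type} (ss : List α) (x : α) (s : Int) :
    PySem.List.enumerate (ss ++ [x]) s
      = PySem.List.enumerate ss s ++ [((s + ss.length : Int), x)] := by
  induction ss generalizing s with
  | nil => simp [PySem.List.enumerate_nil, PySem.List.enumerate_cons]
  | cons y t ih => simp [PySem.List.enumerate_cons, ih]; ring_nf

theorem mem_enum_bounds {α : Type} (ss : List α) (p : Int × α) (h : p ∈ PySem.List.enumerate ss 0) :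
    0 ≤ p.1 ∧ p.1 < ss.length := by
  have heq := PySem.List.map_fst_enumerate ss (0:Int)
  have hm : p.1 ∈ (PySem.List.enumerate ss 0).map (·.1) := List.mem_map_of_mem h
  rw [heq] at hm
  have := PySem.List.mem_pyRange_one.mp hm
  omega

theorem count_single (s x : String) : List.count s [x] = if s = x then 1 else 0 := by
  by_cases h : s = x
  · simp [h]
  · rw [if_neg h, List.count_eq_zero]
    simp [h]

theorem contains_append_single (t : List String) (x s : String) (h : s = x → s ∈ t) :
    ((t ++ [x]).contains s) = (t.contains s) := by
  rw [Bool.eq_iff_iff]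
  simp only [List.contains_iff_mem, List.mem_append, List.mem_singleton]
  constructor
  · rintro (h1 | h1)
    · exact h1
    · exact h h1
  · exact Or.inl

theorem SO_snoc (ss : List String) (x : String) :
    SO (ss ++ [x]) = SO ss ++ (if ss.count x = 1 then [((ss.length : Int), x)] else []) := by
  unfold SO
  rw [enum_append_singleton, List.filter_append]
  congr 1
  · apply List.filter_congr
    intro p hp
    have hb := mem_enum_bounds ss p hp
    rw [List.take_append_of_le_length (by omega)]
  · simp
    split_ifs with h <;> simp_all

theorem idxs_snoc (ss : List String) (x : String) (s : String) :
    idxs (ss ++ [x]) s = idxs ss s ++ (if x = s then [((ss.length : Int))] else []) := by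
  unfold idxs
  rw [enum_append_singleton, List.filter_append, List.map_append]
  congr 1
  split_ifs with h <;> simp_all

theorem length_idxs (ss : List String) (s : String) :
    (idxs ss s).length = ss.count s := by
  induction ss using List.reverseRecOn with
  | nil => simp [idxs, PySem.List.enumerate_nil]
  | append_singleton t x ih =>
      rw [idxs_snoc, List.length_append, ih, List.count_append, count_single]
      by_cases h : x = s
      · subst h; simp
      · rw [if_neg h, if_neg (Ne.symm h)]; simp

theorem pyGetD_append_stable (b : Int) (l : List Int) (h : 2 ≤ l.length) :
    PySem.List.pyGetD (l ++ [b]) 1 0 = PySem.List.pyGetD l 1 0 := by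
  rw [PySem.List.pyGetD_eq_getElem (xs := l ++ [b]) (i := 1) (d := 0) (by omega) (by simp; omega),
      PySem.List.pyGetD_eq_getElem (xs := l) (i := 1) (d := 0) (by omega) (by omega)]
  exact List.getElem_append_left (by omega)

theorem pyGetD_append_second (b : Int) (l : List Int) (hl : l.length = 1) :
    PySem.List.pyGetD (l ++ [b]) 1 0 = b := by
  rw [PySem.List.pyGetD_eq_getElem (xs := l ++ [b]) (i := 1) (d := 0) (by omega) (by simp; omega)]
  simp [hl]

theorem SO_pairwise (ss : List String) : (SO ss).Pairwise (fun a b => a.1 < b.1) := by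
  apply List.Pairwise.filter
  have heq := PySem.List.map_fst_enumerate ss (0:Int)
  have : ((PySem.List.enumerate ss).map (·.1)).Pairwise (· < ·) := by
    rw [heq]; exact PySem.List.pairwise_lt_pyRange_one _ _
  exact (List.pairwise_map.mp this)

/-- the combined invariant about SO -/
theorem SO_props (ss : List String) :
    (∀ p ∈ SO ss, PySem.List.pyGetD (idxs ss p.2) 1 0 = p.1) ∧
    (∀ s, s ∈ (SO ss).map (·.2) ↔ 2 ≤ ss.count s) ∧
    ((SO ss).map (·.2)).Nodup := by
  induction ss using List.reverseRecOn with
  | nil => simp [SO, PySem.List.enumerate_nil]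
  | append_singleton t x ih =>
      obtain ⟨ih1, ih2, ih3⟩ := ih
      rw [SO_snoc]
      by_cases h1 : t.count x = 1
      · rw [if_pos h1]
        refine ⟨?_, ?_, ?_⟩
        · intro p hp
          rcases List.mem_append.mp hp with hp | hp
          · have hx : x ≠ p.2 := by
              intro he
              have : 2 ≤ t.count p.2 := (ih2 p.2).mp (List.mem_map_of_mem hp)
              rw [← he] at this; omega
            rw [idxs_snoc, if_neg hx, List.append_nil]
            exact ih1 p hp
          · obtain rfl := List.mem_singleton.mp hp
            show PySem.List.pyGetD (idxs (t ++ [x]) x) 1 0 = (t.length : Int)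
            rw [idxs_snoc, if_pos rfl]
            exact pyGetD_append_second _ _ (by rw [length_idxs, h1])
        · intro s
          simp only [List.map_append, List.map_cons, List.map_nil, List.mem_append,
            List.mem_singleton, ih2, List.count_append, count_single]
          by_cases hs : s = x
          · subst hs; simp [h1]
          · simp [hs]
        · simp only [List.map_append, List.map_cons, List.map_nil]
          rw [List.nodup_append]
          refine ⟨ih3, by simp, ?_⟩
          intro a ha b hb
          have := (ih2 a).mp ha
          have hbx : b = x := by simpa using hb
          subst hbx
          intro hab
          rw [hab] at this
          omega
      · rw [if_neg h1, List.append_nil]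
        refine ⟨?_, ?_, ih3⟩
        · intro p hp
          by_cases hx : x = p.2
          · have h2 : 2 ≤ t.count p.2 := (ih2 p.2).mp (List.mem_map_of_mem hp)
            rw [idxs_snoc, if_pos hx]
            rw [pyGetD_append_stable _ _ (by rw [length_idxs]; omega)]
            exact ih1 p hp
          · rw [idxs_snoc, if_neg hx, List.append_nil]
            exact ih1 p hp
        · intro s
          rw [ih2, List.count_append, count_single]
          by_cases hs : s = x
          · subst hs; rw [if_pos rfl]; omega
          · rw [if_neg hs]; omega

/-- A's loop computes the second-occurrence elements in order -/
theorem A_fold (ss : List String) :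
    (∀ s, (ss.foldl stepA (PySem.Dict.empty, [])).1.contains s = ss.contains s) ∧
    (ss.foldl stepA (PySem.Dict.empty, [])).2 = (SO ss).map (·.2) := by
  induction ss using List.reverseRecOn with
  | nil => simp [SO, PySem.List.enumerate_nil, PySem.Dict.contains_empty]
  | append_singleton t x ih =>
      obtain ⟨ih1, ih2⟩ := ih
      rw [List.foldl_append]
      simp only [List.foldl_cons, List.foldl_nil]
      rw [SO_snoc]
      set st := t.foldl stepA (PySem.Dict.empty, []) with hst
      by_cases hseen : st.1.contains x = true
      · have hmem : x ∈ t := by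
          have := ih1 x; rw [hseen] at this
          exact List.contains_iff_mem.mp this.symm
        have hc1 : 1 ≤ t.count x := List.one_le_count_iff.mpr hmem
        by_cases hres : st.2.contains x = true
        · have h2 : 2 ≤ t.count x := by
            rw [ih2] at hres
            exact ((SO_props t).2.1 x).mp (List.contains_iff_mem.mp hres)
          have hne : ¬ t.count x = 1 := by omega
          rw [if_neg hne, List.append_nil]
          unfold stepA
          rw [hseen, hres]
          simp only [Bool.not_true, Bool.false_eq_true, if_false]
          refine ⟨?_, ih2⟩
          intro s
          rw [ih1 s, contains_append_single t x s (fun he => he ▸ hmem)]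
        · have hres' : st.2.contains x = false := by simpa using hres
          have hnot2 : ¬ 2 ≤ t.count x := by
            intro h2
            have hmm := ((SO_props t).2.1 x).mpr h2
            have := List.contains_iff_mem.mpr hmm
            rw [← ih2] at this
            rw [this] at hres'; simp at hres'
          have hc : t.count x = 1 := by omega
          rw [if_pos hc]
          unfold stepA
          rw [hseen, hres']
          simp only [Bool.not_true, Bool.not_false, Bool.false_eq_true, if_false, if_true]
          constructor
          · intro s
            rw [ih1 s, contains_append_single t x s (fun he => he ▸ hmem)]
          · rw [ih2]; simp
      · have hseen' : st.1.contains x = false := by simpa using hseen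
        have hmem : x ∉ t := by
          have := ih1 x; rw [hseen'] at this
          intro hx
          have hc := List.contains_iff_mem.mpr hx
          rw [hc] at this; simp at this
        have hc0 : t.count x = 0 := List.count_eq_zero.mpr hmem
        rw [if_neg (by omega), List.append_nil]
        unfold stepA
        rw [hseen']
        simp only [Bool.not_false, if_true]
        refine ⟨?_, ih2⟩
        intro s
        by_cases hs : s = x
        · subst hs
          rw [PySem.Dict.contains_eq_decide_mem_keys]
          simp [PySem.Dict.mem_keys_insert]
        · have hL : ((st.1.insert x 0).contains s) = (st.1.contains s) := by
            rw [PySem.Dict.contains_eq_decide_mem_keys, PySem.Dict.contains_eq_decide_mem_keys]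
            simp [PySem.Dict.mem_keys_insert, hs]
          rw [hL, ih1 s, contains_append_single t x s (fun he => absurd he hs)]

/-- B's dict has items (s, idxs ss s) over the distinct elements -/
theorem B_items (ss : List String) :
    ((PySem.List.enumerate ss).foldl stepB PySem.Dict.empty).items
      = (PySem.Set.ofList ss).map (fun s => (s, idxs ss s)) := by
  have hkeys : ((PySem.List.enumerate ss).foldl stepB PySem.Dict.empty).keys
      = PySem.Set.ofList ss := by
    unfold stepB
    rw [PySem.Dict.keys_foldl_modify_key (key := fun p : Int × String => p.2)
      (f := fun _ p => (· ++ [p.1]))]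
    rw [PySem.List.map_snd_enumerate]
    rfl
  have hnd : ((PySem.List.enumerate ss).foldl stepB PySem.Dict.empty).keys.Nodup := by
    rw [hkeys]; exact PySem.Set.nodup_ofList ss
  have hget : ∀ s, ((PySem.List.enumerate ss).foldl stepB PySem.Dict.empty).getD s []
      = idxs ss s := by
    intro s
    have hfold : (PySem.List.enumerate ss).foldl stepB PySem.Dict.empty
        = ((PySem.List.enumerate ss).map (fun p => (p.2, p.1))).foldl
            (fun d q => d.modify q.1 [] (· ++ [q.2])) PySem.Dict.empty := by
      rw [List.foldl_map]; rfl
    rw [hfold, PySem.Dict.getD_foldl_modify_append, PySem.Dict.getD_empty]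
    rw [List.filter_map, List.map_map]
    unfold idxs
    simp only [Function.comp_def]
    simp
  rw [PySem.Dict.items_eq_map_keys _ hnd [], hkeys]
  exact List.map_congr_left (fun s _ => by rw [hget s])

theorem main_eq (ss : List String) :
    (ss.foldl stepA (PySem.Dict.empty, [])).2
      = (PySem.List.sorted
          ((((PySem.List.enumerate ss).foldl stepB PySem.Dict.empty).items.filter
              (fun q => decide (2 ≤ q.2.length))).map
            (fun q => (PySem.List.pyGetD q.2 1 0, q.1)))
          (fun t => t.1) false).map (fun t => t.2) := by
  obtain ⟨hso1, hso2, hso3⟩ := SO_props ss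
  rw [(A_fold ss).2, B_items ss]
  have hfm : ((PySem.Set.ofList ss).map (fun s => (s, idxs ss s))).filter
        (fun q => decide (2 ≤ q.2.length))
      = ((PySem.Set.ofList ss).filter (fun s => decide (2 ≤ ss.count s))).map
        (fun s => (s, idxs ss s)) := by
    rw [List.filter_map]
    congr 1
    apply List.filter_congr
    intro s _
    simp [Function.comp, length_idxs]
  rw [hfm, List.map_map]
  -- the pairs list is a permutation of SO ss
  have hbase : ((SO ss).map (·.2)).Perm
      ((PySem.Set.ofList ss).filter (fun s => decide (2 ≤ ss.count s))) := by
    rw [List.perm_ext_iff_of_nodup hso3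
      ((PySem.Set.nodup_ofList ss).filter _)]
    intro s
    rw [hso2, List.mem_filter]
    constructor
    · intro h2
      refine ⟨(PySem.Set.mem_ofList _ _).mpr ?_, by simpa using h2⟩
      exact List.count_pos_iff.mp (by omega)
    · intro hh
      simpa using hh.2
  have hSOeq : ((SO ss).map (·.2)).map
      ((fun q : String × List Int => (PySem.List.pyGetD q.2 1 0, q.1)) ∘
        (fun s => (s, idxs ss s))) = SO ss := by
    rw [List.map_map]
    have hpt : ∀ p ∈ SO ss,
        (((fun q : String × List Int => (PySem.List.pyGetD q.2 1 0, q.1)) ∘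
          (fun s => (s, idxs ss s))) ∘ (·.2)) p = id p := by
      intro p hp
      simp [Function.comp, hso1 p hp]
    rw [List.map_congr_left hpt, List.map_id]
  have hperm : (SO ss).Perm
      (((PySem.Set.ofList ss).filter (fun s => decide (2 ≤ ss.count s))).map
        ((fun q : String × List Int => (PySem.List.pyGetD q.2 1 0, q.1)) ∘
          (fun s => (s, idxs ss s)))) := by
    have := hbase.map ((fun q : String × List Int => (PySem.List.pyGetD q.2 1 0, q.1)) ∘
        (fun s => (s, idxs ss s)))
    rwa [hSOeq] at this
  have hsort := PySem.List.sorted_eq_of_perm_of_pairwise_lt _ _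
      (fun t : Int × String => t.1) hperm (SO_pairwise ss)
  exact congrArg (List.map (fun t : Int × String => t.2)) hsort.symm

-- ===== VERDICT (by name: the statement is the Claim_ definition above) =====
theorem remember_spec : Claim_equal_remember := by
  intro str_ _
  unfold Spec_remember remember remember_alt
  have hA : str_.toList.foldl
      (fun (st : PySem.Dict String Int × List String) c =>
        let el := String.mk [c]
        if !(st.1.contains el) then (st.1.insert el 0, st.2)
        else if !(st.2.contains el) then (st.1, st.2 ++ [el])
        else st)
      (PySem.Dict.empty, [])
      = (str_.toList.map toS).foldl stepA (PySem.Dict.empty, []) := by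
    rw [List.foldl_map]; rfl
  have hB : (PySem.List.enumerate str_.toList).foldl
      (fun d p => d.modify (String.mk [p.2]) [] (· ++ [p.1])) PySem.Dict.empty
      = (PySem.List.enumerate (str_.toList.map toS)).foldl stepB PySem.Dict.empty := by
    rw [enum_map, List.foldl_map]; rfl
  rw [hA, hB]
  exact main_eq (str_.toList.map toS)
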